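-- pv_equiv track=rewrite | github.com/huangziwei/nik | nik/tts.py | _group_to_kanji
-- ===== SOURCE A (Python) =====
-- _KANJI_DIGITS = {
--     1: "一",
--     2: "二",
--     3: "三",
--     4: "四",
--     5: "五",
--     6: "六",
--     7: "七",
--     8: "八",
--     9: "九",
-- }
--
-- _KANJI_UNITS = ["", "十", "百", "千"]
--
-- def _group_to_kanji(value: int) -> str:
--     if value <= 0:
--         return ""
--     out = []
--     thousands = value // 1000
--     hundreds = (value // 100) % 10
--     tens = (value // 10) % 10
--     ones = value % 10
--     digits = [thousands, hundreds, tens, ones]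
--     for idx, digit in enumerate(digits):
--         if digit == 0:
--             continue
--         unit = _KANJI_UNITS[len(digits) - idx - 1]
--         if digit == 1 and unit:
--             out.append(unit)
--         else:
--             out.append(f"{_KANJI_DIGITS.get(digit, '')}{unit}")
--     return "".join(out)
-- ===== SOURCE B (Python) =====
-- _KANJI_DIGITS = {
--     1: "一", 2: "二", 3: "三", 4: "四", 5: "五",
--     6: "六", 7: "七", 8: "八", 9: "九",
-- }
--
-- _KANJI_UNITS = ["", "十", "百", "千"]
--
--
-- def _group_to_kanji(value: int) -> str:
--     # Build the string right-to-left, peeling digits LSB-first.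
--     if value <= 0:
--         return ""
--     result = ""
--     place = 0
--     while value > 0:
--         digit = value % 10
--         value //= 10
--         if digit:
--             unit = _KANJI_UNITS[place]
--             if digit == 1 and unit:
--                 chunk = unit
--             else:
--                 chunk = _KANJI_DIGITS.get(digit, "") + unit
--             result = chunk + result
--         place += 1
--     return result
-- ===== Notes on version B (the rewrite author's own statement) =====
-- stated objective: alternative
-- what changed: B peels digits LSB-first with a while loop (digit = value%10, value//=10, stopping when the value is exhausted) and prepends each chunk, instead of precomputing a fixed four-element [thousands,hundreds,tens,ones] list and scanning it forward with enumerate.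
-- outside the precondition, e.g. on _group_to_kanji(10000): A returns '千', B raises IndexError; on _group_to_kanji(23456): A returns '千四百五十六', B raises IndexError
import Mathlib
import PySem

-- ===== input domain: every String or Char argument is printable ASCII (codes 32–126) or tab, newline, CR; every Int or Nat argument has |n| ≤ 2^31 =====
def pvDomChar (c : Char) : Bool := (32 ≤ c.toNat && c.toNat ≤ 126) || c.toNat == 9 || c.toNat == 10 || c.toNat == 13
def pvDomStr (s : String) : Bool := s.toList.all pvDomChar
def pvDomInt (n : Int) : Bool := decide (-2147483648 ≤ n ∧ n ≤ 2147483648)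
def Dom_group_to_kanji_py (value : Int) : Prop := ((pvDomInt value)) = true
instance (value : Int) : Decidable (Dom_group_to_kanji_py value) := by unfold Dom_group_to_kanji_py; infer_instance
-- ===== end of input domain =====

-- B builds the string right-to-left, peeling digits LSB-first with a while loop, instead of
-- A's fixed four-element digit list scanned forward (objective: alternative decomposition).

-- ===== PORT A =====
-- _KANJI_DIGITS (module constant)
def kanjiDigits : PySem.Dict Int String :=
  PySem.Dict.ofList [(1, "一"), (2, "二"), (3, "三"), (4, "四"), (5, "五"),
                     (6, "六"), (7, "七"), (8, "八"), (9, "九")]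

-- _KANJI_UNITS (module constant)
def kanjiUnits : List String := ["", "十", "百", "千"]

def group_to_kanji_py (value : Int) : String :=
  if value ≤ 0 then ""
  else
    let thousands := PySem.Int.floordiv value 1000
    let hundreds := PySem.Int.mod (PySem.Int.floordiv value 100) 10
    let tens := PySem.Int.mod (PySem.Int.floordiv value 10) 10
    let ones := PySem.Int.mod value 10
    let digits : List Int := [thousands, hundreds, tens, ones]
    let out := (PySem.List.enumerate digits 0).foldl
      (fun out p =>
        if p.2 = 0 then out
        else
          -- _KANJI_UNITS[len(digits) - idx - 1]: the index always lies within the four units, so pyGet? is some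
          let unit := (PySem.List.pyGet? kanjiUnits ((digits.length : Int) - p.1 - 1)).getD ""
          if p.2 = 1 ∧ unit ≠ "" then out ++ [unit]
          else out ++ [(kanjiDigits.getD p.2 "") ++ unit]) []
    String.join out

-- ===== PORT B =====
-- the while loop of B: peel off digit = value % 10, value //= 10, until the value is exhausted
def bLoop (value : Int) (place : Nat) (result : String) : String :=
  if h : value ≤ 0 then result
  else
    let digit := PySem.Int.mod value 10
    let value' := PySem.Int.floordiv value 10
    let result' :=
      if digit ≠ 0 then
        -- _KANJI_UNITS[place]: Python raises IndexError once place walks past the last unit; Pre_ excludes those inputs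
        let unit := (kanjiUnits[place]?).getD ""
        (if digit = 1 ∧ unit ≠ "" then unit else (kanjiDigits.getD digit "") ++ unit) ++ result
      else result
    bLoop value' (place + 1) result'
termination_by value.toNat
decreasing_by
  have h10 := PySem.Int.floordiv_eq_ediv_of_pos (a := value) (by omega : (0:Int) < 10)
  simp only [h10]
  omega

def group_to_kanji_py_alt (value : Int) : String :=
  if value ≤ 0 then "" else bLoop value 0 ""

-- ===== PRECONDITION & SPEC =====
-- Pre_ excludes value ≥ 10000: there A still returns a string, but B's loop walks past the end
-- of _KANJI_UNITS and raises IndexError (the caller only ever passes groups of at most four digits).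
def Pre_group_to_kanji_py (value : Int) : Prop := value ≤ 9999
instance (value : Int) : Decidable (Pre_group_to_kanji_py value) := by unfold Pre_group_to_kanji_py; infer_instance
def pvWitness_group_to_kanji_py : Int := 1234

def Spec_group_to_kanji_py (value : Int) (out : String) : Prop := out = group_to_kanji_py_alt value
instance (value : Int) (out : String) : Decidable (Spec_group_to_kanji_py value out) := by unfold Spec_group_to_kanji_py; infer_instance

-- ===== CLAIM (what is proved, stated in full; the proofs are below) =====
def Claim_equal_group_to_kanji_py : Prop := ∀ (value : Int), Dom_group_to_kanji_py value → Pre_group_to_kanji_py value → Spec_group_to_kanji_py value (group_to_kanji_py value)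

-- ===== LEMMAS AND PROOFS =====

-- one digit's contribution, shared shape of both programs' branch logic
def chunk (d : Int) (u : String) : String :=
  if d = 0 then ""
  else if d = 1 ∧ u ≠ "" then u
  else (kanjiDigits.getD d "") ++ u

theorem bLoop_eq (v : Int) (p : Nat) (r : String) :
    bLoop v p r =
      if v ≤ 0 then r
      else bLoop (PySem.Int.floordiv v 10) (p + 1)
        (chunk (PySem.Int.mod v 10) ((kanjiUnits[p]?).getD "") ++ r) := by
  rw [bLoop.eq_def]
  split
  · rfl
  · rename_i h
    simp only [chunk]
    by_cases hd : v % 10 = 0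
    · simp [hd]
    · simp [hd]

set_option maxHeartbeats 1000000 in
theorem A_closed (v : Int) (hv : 0 < v) :
    group_to_kanji_py v =
      chunk (v / 1000) "千" ++ (chunk (v / 100 % 10) "百" ++
        (chunk (v / 10 % 10) "十" ++ chunk (v % 10) "")) := by
  have hm : ∀ w : Int, PySem.Int.mod w 10 = w % 10 := fun w => PySem.Int.mod_eq_emod_of_pos (by omega)
  have hf : ∀ w b : Int, 0 < b → PySem.Int.floordiv w b = w / b := fun w b hb => PySem.Int.floordiv_eq_ediv_of_pos hb
  have u3 : (PySem.List.pyGet? kanjiUnits 3).getD "" = "千" := by decide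
  have u2 : (PySem.List.pyGet? kanjiUnits 2).getD "" = "百" := by decide
  have u1 : (PySem.List.pyGet? kanjiUnits 1).getD "" = "十" := by decide
  have u0 : (PySem.List.pyGet? kanjiUnits 0).getD "" = "" := by decide
  simp only [group_to_kanji_py, if_neg (not_le.mpr hv), hm,
    hf _ 10 (by omega), hf _ 100 (by omega), hf _ 1000 (by omega)]
  simp only [PySem.List.enumerate, List.foldl, List.length_cons, List.length_nil]
  norm_num [u3, u2, u1, u0, chunk]
  split_ifs <;> (try simp [String.join, String.append_assoc]) <;> (apply String.ext; simp)

theorem chunk_zero (u : String) : chunk 0 u = "" := by simp [chunk]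

theorem B_closed (v : Int) (hv : 0 < v) (hv' : v ≤ 9999) :
    bLoop v 0 "" =
      chunk (v / 1000) "千" ++ (chunk (v / 100 % 10) "百" ++
        (chunk (v / 10 % 10) "十" ++ chunk (v % 10) "")) := by
  have hm : ∀ w : Int, PySem.Int.mod w 10 = w % 10 := fun w => PySem.Int.mod_eq_emod_of_pos (by omega)
  have hf : ∀ w : Int, PySem.Int.floordiv w 10 = w / 10 := fun w => PySem.Int.floordiv_eq_ediv_of_pos (by omega)
  rw [bLoop_eq, if_neg (by omega), hm, hf]
  by_cases h1 : v / 10 ≤ 0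
  · rw [bLoop_eq, if_pos h1]
    have e1 : v / 1000 = 0 := by omega
    have e2 : v / 100 % 10 = 0 := by omega
    have e3 : v / 10 % 10 = 0 := by omega
    simp [e1, e2, e3, chunk_zero, kanjiUnits]
  · rw [bLoop_eq, if_neg h1, hm, hf]
    have g1 : v / 10 / 10 = v / 100 := by omega
    rw [g1]
    by_cases h2 : v / 100 ≤ 0
    · rw [bLoop_eq, if_pos h2]
      have e1 : v / 1000 = 0 := by omega
      have e2 : v / 100 % 10 = 0 := by omega
      simp [e1, e2, chunk_zero, kanjiUnits]
    · rw [bLoop_eq, if_neg h2, hm, hf]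
      have g2 : v / 100 / 10 = v / 1000 := by omega
      rw [g2]
      by_cases h3 : v / 1000 ≤ 0
      · rw [bLoop_eq, if_pos h3]
        have e1 : v / 1000 = 0 := by omega
        simp [e1, chunk_zero, kanjiUnits]
      · rw [bLoop_eq, if_neg h3, hm, hf]
        have g3 : v / 1000 / 10 = 0 := by omega
        have g4 : v / 1000 % 10 = v / 1000 := by omega
        rw [g3, g4, bLoop_eq, if_pos le_rfl]
        simp [kanjiUnits]

-- ===== VERDICT (by name: the statement is the Claim_ definition above) =====
theorem group_to_kanji_py_spec : Claim_equal_group_to_kanji_py := by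
  intro v _ hpre
  unfold Spec_group_to_kanji_py group_to_kanji_py_alt
  by_cases h : v ≤ 0
  · simp [group_to_kanji_py, h]
  · rw [if_neg h, A_closed v (by omega), B_closed v (by omega) hpre]
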